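-- pv_equiv track=rewrite | github.com/RJGH-PDEs/rel_landau | test/parallel.py | create_param_iterable
-- ===== SOURCE A (Python) =====
-- def create_param_iterable(n):
--     param = []
--
--     # iterate for all test functions
--     for k in range(0, n):
--         for l in range(0, n):
--             for m in range(-l, l+1):
--                 # iterate over all p
--                 for k1 in range(0, n):
--                     for l1 in range(0, n):
--                         for m1 in range(-l1, l1+1):
--                             # iterate over all q
--                             for k2 in range(0, n):
--                                 for l2 in range(0, n):
--                                     for m2 in range(-l2, l2+1):
--                                         # create the select
--                                         select = [[k,l,m],[k1,l1,m1],[k2,l2,m2]]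
--
--                                         # skip conservation laws
--                                         mass = [k,l,m] == [0,0,0]
--                                         px   = [k,l,m] == [0,1,-1]
--                                         py   = [k,l,m] == [0,1,0]
--                                         pz   = [k,l,m] == [0,1,1]
--                                         e    = [k,l,m] == [1,0,0]
--                                         flag = mass or px or py or pz or e
--
--                                         if not flag:
--                                             param.append(select)
--
--     return param
-- ===== SOURCE B (Python) =====
-- def _cartesian(tables):
--     # generic n-ary Cartesian product, built by recursion on the list of tables;
--     # the product of the tail tables is computed once and its rows are shared
--     if not tables:
--         return [[]]
--     rest = _cartesian(tables[1:])
--     return [[list(t)] + tail for t in tables[0] for tail in rest]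
--
--
-- def create_param_iterable(n):
--     table = [(k, l, m) for k in range(n) for l in range(n) for m in range(-l, l + 1)]
--     excluded = {(0, 0, 0), (0, 1, -1), (0, 1, 0), (0, 1, 1), (1, 0, 0)}
--     allowed = [t for t in table if t not in excluded]
--     return _cartesian([allowed, table, table])
-- ===== Notes on version B (the rewrite author's own statement) =====
-- stated objective: simpler
-- what changed: B builds the (k,l,m) index table once, filters the five conserved triples out of it up front, and hands [allowed, table, table] to a generic recursive n-ary Cartesian-product helper, instead of nine nested range loops recomputing indices and five list-equality checks per innermost iteration.
import Mathlib
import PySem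

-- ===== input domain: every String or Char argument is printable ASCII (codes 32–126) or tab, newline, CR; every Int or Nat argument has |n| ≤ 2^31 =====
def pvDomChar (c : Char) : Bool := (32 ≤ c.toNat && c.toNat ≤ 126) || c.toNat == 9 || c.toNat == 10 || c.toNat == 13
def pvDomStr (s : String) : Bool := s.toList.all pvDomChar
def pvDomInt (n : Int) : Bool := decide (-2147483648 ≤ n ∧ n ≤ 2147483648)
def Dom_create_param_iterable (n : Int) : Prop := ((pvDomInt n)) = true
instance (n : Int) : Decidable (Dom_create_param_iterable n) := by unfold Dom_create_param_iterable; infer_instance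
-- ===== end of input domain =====

-- B replaces the nine nested loops by a pre-filtered index table fed to a generic
-- recursive n-ary Cartesian-product helper; objective: simpler decomposition, same cost.

-- ===== PORT A =====
def create_param_iterable (n : Int) : List (List (List Int)) :=
  (PySem.List.pyRange 0 n 1).foldl (fun param k =>
    (PySem.List.pyRange 0 n 1).foldl (fun param l =>
      (PySem.List.pyRange (-l) (l+1) 1).foldl (fun param m =>
        (PySem.List.pyRange 0 n 1).foldl (fun param k1 =>
          (PySem.List.pyRange 0 n 1).foldl (fun param l1 =>
            (PySem.List.pyRange (-l1) (l1+1) 1).foldl (fun param m1 =>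
              (PySem.List.pyRange 0 n 1).foldl (fun param k2 =>
                (PySem.List.pyRange 0 n 1).foldl (fun param l2 =>
                  (PySem.List.pyRange (-l2) (l2+1) 1).foldl (fun param m2 =>
                    let select := [[k,l,m],[k1,l1,m1],[k2,l2,m2]]
                    let mass := decide ([k,l,m] = ([0,0,0] : List Int))
                    let px := decide ([k,l,m] = ([0,1,-1] : List Int))
                    let py := decide ([k,l,m] = ([0,1,0] : List Int))
                    let pz := decide ([k,l,m] = ([0,1,1] : List Int))
                    let e := decide ([k,l,m] = ([1,0,0] : List Int))
                    let flag := mass || px || py || pz || e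
                    if !flag then param ++ [select] else param)
                  param) param) param) param) param) param) param) param) []

-- ===== PORT B =====
def pvToList (t : Int × Int × Int) : List Int := [t.1, t.2.1, t.2.2]

-- generic n-ary Cartesian product, recursion on the list of tables (Source B's _cartesian)
def pvCartesian : List (List (Int × Int × Int)) → List (List (List Int))
  | [] => [[]]
  | t :: ts =>
    let rest := pvCartesian ts
    t.flatMap (fun x => rest.map (fun tail => pvToList x :: tail))

def pvTable (n : Int) : List (Int × Int × Int) :=
  (PySem.List.pyRange 0 n 1).flatMap fun k =>
    (PySem.List.pyRange 0 n 1).flatMap fun l =>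
      (PySem.List.pyRange (-l) (l+1) 1).map fun m => (k, l, m)

def pvExcluded : List (Int × Int × Int) :=
  PySem.Set.ofList [(0,0,0), (0,1,-1), (0,1,0), (0,1,1), (1,0,0)]

def create_param_iterable_alt (n : Int) : List (List (List Int)) :=
  let table := pvTable n
  let allowed := table.filter (fun t => !(pvExcluded.contains t))
  pvCartesian [allowed, table, table]

-- ===== PRECONDITION & SPEC =====
def Spec_create_param_iterable (n : Int) (out : List (List (List Int))) : Prop := out = create_param_iterable_alt n
instance (n : Int) (out : List (List (List Int))) : Decidable (Spec_create_param_iterable n out) := by unfold Spec_create_param_iterable; infer_instance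

-- ===== CLAIM (what is proved, stated in full; the proofs are below) =====
def Claim_equal_create_param_iterable : Prop := ∀ (n : Int), Dom_create_param_iterable n → Spec_create_param_iterable n (create_param_iterable n)

-- ===== LEMMAS AND PROOFS =====

-- pushing an element conditionally is appending a conditional list
theorem pv_if_push {α : Type} (c : Bool) (acc xs : List α) :
    (if c then acc ++ xs else acc) = acc ++ (if c then xs else []) := by
  cases c <;> simp

-- the five list-equality checks of A are exactly membership in pvExcluded
theorem pv_flag_eq (k l m : Int) :
    (decide ([k,l,m] = ([0,0,0] : List Int)) || decide ([k,l,m] = ([0,1,-1] : List Int)) ||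
     decide ([k,l,m] = ([0,1,0] : List Int)) || decide ([k,l,m] = ([0,1,1] : List Int)) ||
     decide ([k,l,m] = ([1,0,0] : List Int))) = pvExcluded.contains (k, l, m) := by
  have h : pvExcluded = [(0,0,0), (0,1,-1), (0,1,0), (0,1,1), (1,0,0)] := by rfl
  rw [Bool.eq_iff_iff]
  simp [h, Prod.ext_iff]
  tauto

-- flatMap over a filtered list is flatMap with a conditional body
theorem pv_filter_flatMap {α β : Type} (p : α → Bool) (f : α → List β) (l : List α) :
    (l.filter p).flatMap f = l.flatMap (fun x => if p x then f x else []) := by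
  induction l with
  | nil => rfl
  | cons a t ih => by_cases h : p a <;> simp [h, ih]

-- ===== VERDICT (by name: the statement is the Claim_ definition above) =====
theorem create_param_iterable_spec : Claim_equal_create_param_iterable := by
  intro n _
  unfold Spec_create_param_iterable create_param_iterable create_param_iterable_alt pvCartesian
  simp only [pv_if_push, PySem.List.foldl_append_eq_flatMap, List.nil_append]
  simp only [pv_flag_eq, pvTable, pv_filter_flatMap, List.flatMap_assoc, List.flatMap_map]
  congr 1
  funext k
  congr 1
  funext l
  congr 1
  funext m
  by_cases h : (k, l, m) ∈ pvExcluded <;>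
    simp [h, pvCartesian, pvToList, List.map_flatMap, List.flatMap_map, List.flatMap_assoc]
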